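-- pv_equiv track=rewrite | github.com/scmbuildrelease/gitfusionsrc | libexec/p4gf_submit_trigger.py | find_first_whitespace_not_in_quotes
-- ===== SOURCE A (Python) =====
-- def find_first_whitespace_not_in_quotes(vline):
--     """Locate the first white_space not in quotes."""
--     quote = '"'
--     in_quote = False
--     first_space = -1
--     for i, c in enumerate(vline):
--         if not in_quote:
--             if c == quote:
--                 in_quote = True
--             elif c in " \t":
--                 first_space = i
--                 break
--         else:    # in_quote
--             if c == '"':
--                 in_quote = False
--
--     return first_space
-- ===== SOURCE B (Python) =====
-- def find_first_whitespace_not_in_quotes(vline):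
--     """Locate the first white_space not in quotes."""
--     i, n = 0, len(vline)
--     while i < n:
--         c = vline[i]
--         if c in " \t":
--             return i
--         if c == '"':
--             j = vline.find('"', i + 1)
--             i = n if j == -1 else j + 1
--         else:
--             i += 1
--     return -1
-- ===== Notes on version B (the rewrite author's own statement) =====
-- stated objective: idiomatic
-- what changed: Replaces the per-character state-machine (in_quote flag plus first_space accumulator and break) with a cursor loop that returns early on whitespace and jumps over whole quoted segments at once via str.find.
import Mathlib
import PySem

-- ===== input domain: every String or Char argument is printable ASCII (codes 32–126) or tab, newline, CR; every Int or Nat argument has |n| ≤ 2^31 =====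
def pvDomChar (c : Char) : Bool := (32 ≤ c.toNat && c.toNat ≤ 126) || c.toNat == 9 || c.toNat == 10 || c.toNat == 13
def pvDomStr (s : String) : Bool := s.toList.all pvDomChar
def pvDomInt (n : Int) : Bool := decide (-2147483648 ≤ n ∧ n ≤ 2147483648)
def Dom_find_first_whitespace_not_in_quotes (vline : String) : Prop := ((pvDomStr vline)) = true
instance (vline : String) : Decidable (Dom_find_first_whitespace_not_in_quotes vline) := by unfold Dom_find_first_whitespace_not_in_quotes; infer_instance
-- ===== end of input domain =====

-- B replaces A's per-character in_quote state machine with a cursor loop that returns early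
-- on whitespace and skips whole quoted segments at once (str.find); objective: idiomatic.

-- ===== PORT A =====
-- the for-loop with its in_quote flag, first_space accumulator and break, as structural recursion
def pvLoopA : List Char → Nat → Bool → Int
  | [], _, _ => -1
  | c :: cs, i, inq =>
    if !inq then
      if c = '"' then pvLoopA cs (i + 1) true
      else if c = ' ' ∨ c = '\t' then (i : Int)
      else pvLoopA cs (i + 1) inq
    else
      if c = '"' then pvLoopA cs (i + 1) false
      else pvLoopA cs (i + 1) inq

def find_first_whitespace_not_in_quotes (vline : String) : Int :=
  pvLoopA vline.toList 0 false

-- ===== PORT B =====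
-- vline.find('"', i+1): returns the suffix after the found quote and the index just past it
-- (not-found, j = -1 in Python, corresponds to returning ([], index past the end): the cursor jumps to n)
def pvSkipToQuote : List Char → Nat → List Char × Nat
  | [], i => ([], i)
  | c :: cs, i => if c = '"' then (cs, i + 1) else pvSkipToQuote cs (i + 1)

theorem pvSkipToQuote_length (cs : List Char) (i : Nat) :
    (pvSkipToQuote cs i).1.length ≤ cs.length := by
  induction cs generalizing i with
  | nil => simp [pvSkipToQuote]
  | cons c cs ih =>
    simp only [pvSkipToQuote]
    split
    · simp
    · exact Nat.le_succ_of_le (ih (i + 1))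

-- the while-loop of B: early return on whitespace, jump past quoted segments
def pvLoopB : List Char → Nat → Int
  | [], _ => -1
  | c :: cs, i =>
    if c = ' ' ∨ c = '\t' then (i : Int)
    else if c = '"' then
      pvLoopB (pvSkipToQuote cs (i + 1)).1 (pvSkipToQuote cs (i + 1)).2
    else
      pvLoopB cs (i + 1)
termination_by l _ => l.length
decreasing_by
  · exact Nat.lt_succ_of_le (pvSkipToQuote_length cs (i + 1))
  · simp

def find_first_whitespace_not_in_quotes_alt (vline : String) : Int :=
  pvLoopB vline.toList 0

-- ===== PRECONDITION & SPEC =====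
def Spec_find_first_whitespace_not_in_quotes (vline : String) (out : Int) : Prop := out = find_first_whitespace_not_in_quotes_alt vline
instance (vline : String) (out : Int) : Decidable (Spec_find_first_whitespace_not_in_quotes vline out) := by unfold Spec_find_first_whitespace_not_in_quotes; infer_instance

-- ===== CLAIM (what is proved, stated in full; the proofs are below) =====
def Claim_equal_find_first_whitespace_not_in_quotes : Prop := ∀ (vline : String), Dom_find_first_whitespace_not_in_quotes vline → Spec_find_first_whitespace_not_in_quotes vline (find_first_whitespace_not_in_quotes vline)

-- ===== LEMMAS AND PROOFS =====

-- joint invariant: out of quotes A's loop equals B's loop, and in quotes A's loop equals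
-- B's loop resumed just past the closing quote found by pvSkipToQuote
theorem pvLoop_eq (n : Nat) : ∀ l : List Char, l.length ≤ n → ∀ i : Nat,
    pvLoopA l i false = pvLoopB l i ∧
    pvLoopA l i true = pvLoopB (pvSkipToQuote l i).1 (pvSkipToQuote l i).2 := by
  induction n with
  | zero =>
    intro l hl i
    have : l = [] := List.length_eq_zero_iff.mp (Nat.le_zero.mp hl)
    subst this
    simp [pvLoopA, pvLoopB, pvSkipToQuote]
  | succ n ih =>
    intro l hl i
    cases l with
    | nil => simp [pvLoopA, pvLoopB, pvSkipToQuote]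
    | cons c cs =>
      have hcs : cs.length ≤ n := Nat.lt_succ_iff.mp (Nat.lt_of_lt_of_le (Nat.lt_succ_self _) hl)
      constructor
      · -- not in quote
        by_cases hq : c = '"'
        · subst hq
          rw [show pvLoopA ('"' :: cs) i false = pvLoopA cs (i + 1) true by simp [pvLoopA],
              show pvLoopB ('"' :: cs) i =
                pvLoopB (pvSkipToQuote cs (i + 1)).1 (pvSkipToQuote cs (i + 1)).2 by
                simp [pvLoopB]]
          exact (ih cs hcs (i + 1)).2
        · by_cases hw : c = ' ' ∨ c = '\t'
          · simp [pvLoopA, pvLoopB, hq, hw]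
          · rw [show pvLoopA (c :: cs) i false = pvLoopA cs (i + 1) false by
                  simp [pvLoopA, hq, hw],
                show pvLoopB (c :: cs) i = pvLoopB cs (i + 1) by simp [pvLoopB, hq, hw]]
            exact (ih cs hcs (i + 1)).1
      · -- in quote: A scans for the closing quote, matching pvSkipToQuote step for step
        by_cases hq : c = '"'
        · subst hq
          rw [show pvLoopA ('"' :: cs) i true = pvLoopA cs (i + 1) false by simp [pvLoopA],
              show pvSkipToQuote ('"' :: cs) i = (cs, i + 1) by simp [pvSkipToQuote]]
          exact (ih cs hcs (i + 1)).1
        · rw [show pvLoopA (c :: cs) i true = pvLoopA cs (i + 1) true by simp [pvLoopA, hq],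
              show pvSkipToQuote (c :: cs) i = pvSkipToQuote cs (i + 1) by
                simp [pvSkipToQuote, hq]]
          exact (ih cs hcs (i + 1)).2

-- ===== VERDICT (by name: the statement is the Claim_ definition above) =====
theorem find_first_whitespace_not_in_quotes_spec : Claim_equal_find_first_whitespace_not_in_quotes := by
  intro vline _
  unfold Spec_find_first_whitespace_not_in_quotes
  unfold find_first_whitespace_not_in_quotes find_first_whitespace_not_in_quotes_alt
  exact (pvLoop_eq vline.toList.length vline.toList le_rfl 0).1
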